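-- pv_equiv track=rewrite | github.com/Kibou88/__1__Python | __7__Code_Wars/32_Exploding_robots/test.py | will_robots_collide
-- ===== SOURCE A (Python) =====
-- def will_robots_collide(x1, y1, x2, y2, commands):
--     if (x1 == x2 and y1 == y2):
--         return True
--
--     liste_pos_robot1 = {(x1, y1)}
--     temp_pos_robot1 = set()
--     liste_pos_robot2 = {(x2, y2)}
--     temp_pos_robot2 = set()
--     for command in commands:
--         if command in ["U", "D"]:
--             for position in liste_pos_robot1:
--                 if 0 <= (position[1] + (1 if command == "U" else -1)) <= 500:
--                     new_y = (1 if command == "U" else -1) + position[1]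
--                     temp_pos_robot1.add((position[0], new_y))
--             for position in liste_pos_robot2:
--                 if 0 <= (position[1] + (1 if command == "U" else -1)) <= 500:
--                     new_y = (1 if command == "U" else -1) + position[1]
--                     temp_pos_robot2.add((position[0], new_y))
--
--         elif command in ["L", "R"]:
--             for position in liste_pos_robot1:
--                 if 0 <= (position[0] + (1 if command == "L" else -1)) <= 500:
--                     new_x = (1 if command == "L" else -1) + position[0]
--                     temp_pos_robot1.add((new_x, position[1]))
--             for position in liste_pos_robot2:
--                 if 0 <= (position[0] + (1 if command == "L" else -1)) <= 500:
--                     new_x = (1 if command == "L" else -1) + position[0]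
--                     temp_pos_robot2.add((new_x, position[1]))
--
--         liste_pos_robot1 |= temp_pos_robot1
--         liste_pos_robot2 |= temp_pos_robot2
--
--     return True if (liste_pos_robot1 & liste_pos_robot2) else False
-- ===== SOURCE B (Python) =====
-- def will_robots_collide(x1, y1, x2, y2, commands):
--     # Positions are never removed and a move only creates a new position when it
--     # lands on the 0..500 field, so each axis's reachable set is the start value
--     # plus a contiguous block inside 0..500 (None while no move has entered the
--     # field), and the 2D reachable set is the product of the two axis sets.
--
--     def grow(block, v, d):
--         if block is None:
--             return (v + d, v + d) if 0 <= v + d <= 500 else None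
--         lo, hi = block
--         if d > 0:
--             return (lo, min(hi + 1, 500))
--         return (max(lo - 1, 0), hi)
--
--     def axis(v, inc, dec):
--         block = (v, v) if 0 <= v <= 500 else None
--         for c in commands:
--             if c == inc:
--                 block = grow(block, v, 1)
--             elif c == dec:
--                 block = grow(block, v, -1)
--         return block
--
--     def meets(v1, b1, v2, b2):
--         # do the sets {v1} | b1 and {v2} | b2 share a value?
--         return (v1 == v2
--                 or (b2 is not None and b2[0] <= v1 <= b2[1])
--                 or (b1 is not None and b1[0] <= v2 <= b1[1])
--                 or (b1 is not None and b2 is not None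
--                     and max(b1[0], b2[0]) <= min(b1[1], b2[1])))
--
--     return (meets(x1, axis(x1, "L", "R"), x2, axis(x2, "L", "R"))
--             and meets(y1, axis(y1, "U", "D"), y2, axis(y2, "U", "D")))
-- ===== Notes on version B (the rewrite author's own statement) =====
-- stated objective: alternative
-- what changed: A enumerates both robots' full 2D reachable position sets (rescanning every stored position per command); B observes that moves act per axis and only create positions inside the 0..500 field, so each axis's reachable set is the start value plus one contiguous in-field block, tracked as two bounds per axis in a single pass, and collision is a per-axis set-intersection test.
import Mathlib
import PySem

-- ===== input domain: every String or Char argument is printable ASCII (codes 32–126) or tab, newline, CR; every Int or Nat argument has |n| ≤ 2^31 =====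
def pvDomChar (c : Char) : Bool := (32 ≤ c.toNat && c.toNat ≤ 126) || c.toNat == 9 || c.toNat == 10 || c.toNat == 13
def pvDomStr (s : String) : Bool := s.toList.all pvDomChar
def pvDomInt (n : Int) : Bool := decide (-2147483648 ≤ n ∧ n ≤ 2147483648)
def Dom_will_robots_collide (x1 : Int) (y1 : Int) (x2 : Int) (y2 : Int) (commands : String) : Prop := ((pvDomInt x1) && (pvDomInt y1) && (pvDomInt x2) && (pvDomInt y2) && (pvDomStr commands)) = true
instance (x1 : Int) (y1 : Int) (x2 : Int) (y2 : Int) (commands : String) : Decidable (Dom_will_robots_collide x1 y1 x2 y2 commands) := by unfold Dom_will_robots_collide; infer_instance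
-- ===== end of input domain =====

-- B replaces A's breadth-first enumeration of full 2D position sets by per-axis reachable
-- sets (start value plus one contiguous in-field block), each kept as two bounds in a
-- single pass (objective: alternative).

-- ===== PORT A =====
-- one loop iteration of A's `for command in commands`, for one robot's (liste, temp) pair
-- (A's body repeats the identical code for robot 1 and robot 2; this helper is that code)
def pvRobotStep (c : Char) (lt : PySem.Set (Int × Int) × PySem.Set (Int × Int)) :
    PySem.Set (Int × Int) × PySem.Set (Int × Int) :=
  let l := lt.1
  let t := lt.2
  let t' :=
    if c = 'U' ∨ c = 'D' then
      let d : Int := if c = 'U' then 1 else -1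
      l.foldl (fun t p => if 0 ≤ p.2 + d ∧ p.2 + d ≤ 500 then PySem.Set.add t (p.1, d + p.2) else t) t
    else if c = 'L' ∨ c = 'R' then
      let d : Int := if c = 'L' then 1 else -1
      l.foldl (fun t p => if 0 ≤ p.1 + d ∧ p.1 + d ≤ 500 then PySem.Set.add t (d + p.1, p.2) else t) t
    else t
  (PySem.Set.union l t', t')

def will_robots_collide (x1 : Int) (y1 : Int) (x2 : Int) (y2 : Int) (commands : String) : Bool :=
  if x1 = x2 ∧ y1 = y2 then true
  else
    let r1 := commands.toList.foldl (fun lt c => pvRobotStep c lt)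
      (PySem.Set.ofList [(x1, y1)], PySem.Set.empty)
    let r2 := commands.toList.foldl (fun lt c => pvRobotStep c lt)
      (PySem.Set.ofList [(x2, y2)], PySem.Set.empty)
    !(PySem.Set.inter r1.1 r2.1).isEmpty

-- ===== PORT B =====
-- a robot's per-axis reachable set is its start value v plus one contiguous block
-- inside 0..500, `none` while no move has entered the field
def pvGrow (block : Option (Int × Int)) (v : Int) (d : Int) : Option (Int × Int) :=
  match block with
  | none => if 0 ≤ v + d ∧ v + d ≤ 500 then some (v + d, v + d) else none
  | some (lo, hi) => if d > 0 then some (lo, min (hi + 1) 500) else some (max (lo - 1) 0, hi)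

def pvAxis (commands : String) (v : Int) (inc : Char) (dec : Char) : Option (Int × Int) :=
  commands.toList.foldl
    (fun block c => if c = inc then pvGrow block v 1 else if c = dec then pvGrow block v (-1) else block)
    (if 0 ≤ v ∧ v ≤ 500 then some (v, v) else none)

def pvInBlock (b : Option (Int × Int)) (w : Int) : Bool :=
  match b with
  | some (lo, hi) => decide (lo ≤ w ∧ w ≤ hi)
  | none => false

def pvMeets (v1 : Int) (b1 : Option (Int × Int)) (v2 : Int) (b2 : Option (Int × Int)) : Bool :=
  (v1 == v2) || pvInBlock b2 v1 || pvInBlock b1 v2 ||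
    (match b1, b2 with
     | some (l1, h1), some (l2, h2) => decide (max l1 l2 ≤ min h1 h2)
     | _, _ => false)

def will_robots_collide_alt (x1 : Int) (y1 : Int) (x2 : Int) (y2 : Int) (commands : String) : Bool :=
  pvMeets x1 (pvAxis commands x1 'L' 'R') x2 (pvAxis commands x2 'L' 'R') &&
  pvMeets y1 (pvAxis commands y1 'U' 'D') y2 (pvAxis commands y2 'U' 'D')

-- ===== PRECONDITION & SPEC =====
def Spec_will_robots_collide (x1 : Int) (y1 : Int) (x2 : Int) (y2 : Int) (commands : String) (out : Bool) : Prop := out = will_robots_collide_alt x1 y1 x2 y2 commands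
instance (x1 : Int) (y1 : Int) (x2 : Int) (y2 : Int) (commands : String) (out : Bool) : Decidable (Spec_will_robots_collide x1 y1 x2 y2 commands out) := by unfold Spec_will_robots_collide; infer_instance

-- ===== CLAIM (what is proved, stated in full; the proofs are below) =====
def Claim_equal_will_robots_collide : Prop := ∀ (x1 : Int) (y1 : Int) (x2 : Int) (y2 : Int) (commands : String), Dom_will_robots_collide x1 y1 x2 y2 commands → Spec_will_robots_collide x1 y1 x2 y2 commands (will_robots_collide x1 y1 x2 y2 commands)

-- ===== LEMMAS AND PROOFS =====

-- membership in A's inner `for position in liste: if …: temp.add(…)` loop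
lemma pv_mem_foldl_add_if {α β : Type} [BEq β] [LawfulBEq β]
    (xs : List α) (cond : α → Prop) [DecidablePred cond] (f : α → β) :
    ∀ (s : PySem.Set β) (y : β),
      y ∈ xs.foldl (fun t p => if cond p then PySem.Set.add t (f p) else t) s ↔
        y ∈ s ∨ ∃ p ∈ xs, cond p ∧ y = f p := by
  induction xs with
  | nil => simp
  | cons a xs ih =>
    intro s y
    simp only [List.foldl_cons, ih]
    by_cases h : cond a
    · simp [h, PySem.Set.mem_add]
      tauto
    · simp [h]

-- the set {w : pvInB b w} is B's contiguous block
def pvInB (b : Option (Int × Int)) (w : Int) : Prop :=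
  match b with
  | some (lo, hi) => lo ≤ w ∧ w ≤ hi
  | none => False

-- the axis's reachable set: the start value v plus the block
def pvAx (v : Int) (b : Option (Int × Int)) (w : Int) : Prop := w = v ∨ pvInB b w

-- well-formedness of a (start, block) pair as it evolves
def pvGood (v : Int) (b : Option (Int × Int)) : Prop :=
  match b with
  | none => ¬(0 ≤ v ∧ v ≤ 500)
  | some (lo, hi) => 0 ≤ lo ∧ lo ≤ hi ∧ hi ≤ 500 ∧
      (v < 0 → v = -1 ∧ lo = 0) ∧ (500 < v → v = 501 ∧ hi = 500) ∧
      (0 ≤ v ∧ v ≤ 500 → lo ≤ v ∧ v ≤ hi)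

lemma pvInBlock_iff (b : Option (Int × Int)) (w : Int) :
    pvInBlock b w = true ↔ pvInB b w := by
  rcases b with _ | ⟨lo, hi⟩ <;> simp [pvInBlock, pvInB]

-- one ±1 step of one axis: pvGrow preserves well-formedness and its reachable set
-- is the old set plus the in-field shifts of old values
lemma pv_axis_step (v : Int) (b : Option (Int × Int)) (d : Int) (hd : d = 1 ∨ d = -1)
    (hG : pvGood v b) :
    pvGood v (pvGrow b v d) ∧
    (∀ w, pvAx v (pvGrow b v d) w ↔
       pvAx v b w ∨ ∃ u, pvAx v b u ∧ 0 ≤ u + d ∧ u + d ≤ 500 ∧ w = d + u) := by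
  rcases b with _ | ⟨lo, hi⟩
  · simp only [pvGood] at hG
    by_cases h : 0 ≤ v + d ∧ v + d ≤ 500
    · have hg : pvGrow none v d = some (v + d, v + d) := by simp [pvGrow, h]
      rw [hg]
      constructor
      · simp only [pvGood]
        refine ⟨by omega, by omega, by omega, ?_, ?_, by omega⟩ <;> intro hv <;> omega
      · intro w
        simp only [pvAx, pvInB]
        constructor
        · rintro (rfl | ⟨h1, h2⟩)
          · exact Or.inl (Or.inl rfl)
          · exact Or.inr ⟨v, Or.inl rfl, by omega, by omega, by omega⟩
        · rintro ((rfl | hf) | ⟨u, (rfl | hf), c1, c2, rfl⟩)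
          · exact Or.inl rfl
          · exact hf.elim
          · exact Or.inr ⟨by omega, by omega⟩
          · exact hf.elim
    · have hg : pvGrow none v d = none := by simp [pvGrow, h]
      rw [hg]
      refine ⟨hG, ?_⟩
      intro w
      simp only [pvAx, pvInB]
      constructor
      · exact Or.inl
      · rintro (hw | ⟨u, (rfl | hf), c1, c2, rfl⟩)
        · exact hw
        · exact absurd ⟨c1, c2⟩ h
        · exact hf.elim
  · simp only [pvGood] at hG
    obtain ⟨g1, g2, g3, g4, g5, g6⟩ := hG
    rcases hd with rfl | rfl
    · have hg : pvGrow (some (lo, hi)) v 1 = some (lo, min (hi + 1) 500) := by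
        simp [pvGrow]
      rw [hg]
      constructor
      · simp only [pvGood]
        refine ⟨g1, by omega, by omega, g4, ?_, ?_⟩
        · intro hv; have := g5 hv; omega
        · intro hv; have := g6 hv; omega
      · intro w
        simp only [pvAx, pvInB]
        constructor
        · rintro (rfl | ⟨h1, h2⟩)
          · exact Or.inl (Or.inl rfl)
          · by_cases hw : w ≤ hi
            · exact Or.inl (Or.inr ⟨h1, hw⟩)
            · exact Or.inr ⟨hi, Or.inr ⟨by omega, le_refl _⟩, by omega, by omega, by omega⟩
        · rintro ((rfl | ⟨h1, h2⟩) | ⟨u, (hu | ⟨h1, h2⟩), c1, c2, rfl⟩)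
          · exact Or.inl rfl
          · exact Or.inr ⟨h1, by omega⟩
          · subst hu
            refine Or.inr ?_
            by_cases hv0 : u < 0
            · obtain ⟨hv1, hlo⟩ := g4 hv0; omega
            · by_cases hv5 : 500 < u
              · obtain ⟨hv1, hhi⟩ := g5 hv5; omega
              · obtain ⟨hl, hh⟩ := g6 ⟨by omega, by omega⟩; omega
          · exact Or.inr ⟨by omega, by omega⟩
    · have hg : pvGrow (some (lo, hi)) v (-1) = some (max (lo - 1) 0, hi) := by
        simp [pvGrow]
      rw [hg]
      constructor
      · simp only [pvGood]
        refine ⟨by omega, by omega, g3, ?_, g5, ?_⟩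
        · intro hv; have := g4 hv; omega
        · intro hv; have := g6 hv; omega
      · intro w
        simp only [pvAx, pvInB]
        constructor
        · rintro (rfl | ⟨h1, h2⟩)
          · exact Or.inl (Or.inl rfl)
          · by_cases hw : lo ≤ w
            · exact Or.inl (Or.inr ⟨hw, h2⟩)
            · exact Or.inr ⟨lo, Or.inr ⟨le_refl _, by omega⟩, by omega, by omega, by omega⟩
        · rintro ((rfl | ⟨h1, h2⟩) | ⟨u, (hu | ⟨h1, h2⟩), c1, c2, rfl⟩)
          · exact Or.inl rfl
          · exact Or.inr ⟨by omega, h2⟩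
          · subst hu
            refine Or.inr ?_
            by_cases hv0 : u < 0
            · obtain ⟨hv1, hlo⟩ := g4 hv0; omega
            · by_cases hv5 : 500 < u
              · obtain ⟨hv1, hhi⟩ := g5 hv5; omega
              · obtain ⟨hl, hh⟩ := g6 ⟨by omega, by omega⟩; omega
          · exact Or.inr ⟨by omega, by omega⟩

-- invariant: A's liste is exactly the product of the two axis sets, both well-formed
def pvInv2 (l : PySem.Set (Int × Int)) (bx bY : Option (Int × Int)) (vx vy : Int) : Prop :=
  (∀ p : Int × Int, p ∈ l ↔ pvAx vx bx p.1 ∧ pvAx vy bY p.2) ∧ pvGood vx bx ∧ pvGood vy bY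

lemma pv_step_inv2 (vx vy : Int) (c : Char) (l t : PySem.Set (Int × Int))
    (bx bY : Option (Int × Int))
    (hinv : pvInv2 l bx bY vx vy) (ht : ∀ p ∈ t, p ∈ l) :
    pvInv2 (pvRobotStep c (l, t)).1
      (if c = 'L' then pvGrow bx vx 1 else if c = 'R' then pvGrow bx vx (-1) else bx)
      (if c = 'U' then pvGrow bY vy 1 else if c = 'D' then pvGrow bY vy (-1) else bY) vx vy
      ∧ (∀ p ∈ (pvRobotStep c (l, t)).2, p ∈ (pvRobotStep c (l, t)).1) := by
  obtain ⟨hl, hgx, hgy⟩ := hinv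
  have hsub : ∀ p ∈ (pvRobotStep c (l, t)).2, p ∈ (pvRobotStep c (l, t)).1 := by
    intro p hp
    simp only [pvRobotStep, PySem.Set.mem_union] at hp ⊢
    exact Or.inr hp
  by_cases hU : c = 'U'
  · subst hU
    rw [if_neg (by decide), if_neg (by decide), if_pos rfl]
    obtain ⟨hg', hiff⟩ := pv_axis_step vy bY 1 (Or.inl rfl) hgy
    refine ⟨⟨?_, hgx, hg'⟩, hsub⟩
    intro p
    have hA : (pvRobotStep 'U' (l, t)).1 = PySem.Set.union l
        (List.foldl (fun t (p : Int × Int) =>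
          if 0 ≤ p.2 + 1 ∧ p.2 + 1 ≤ 500 then PySem.Set.add t (p.1, 1 + p.2) else t) t l) := rfl
    rw [hA]
    simp only [PySem.Set.mem_union, pv_mem_foldl_add_if]
    constructor
    · rintro (h | h | ⟨q, hq, hc, rfl⟩)
      · have := (hl p).mp h
        exact ⟨this.1, (hiff p.2).mpr (Or.inl this.2)⟩
      · have := (hl p).mp (ht p h)
        exact ⟨this.1, (hiff p.2).mpr (Or.inl this.2)⟩
      · have hql := (hl q).mp hq
        exact ⟨hql.1, (hiff _).mpr (Or.inr ⟨q.2, hql.2, hc.1, hc.2, rfl⟩)⟩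
    · rintro ⟨hx, hy⟩
      rcases (hiff p.2).mp hy with h | ⟨u, hu, c1, c2, heq⟩
      · exact Or.inl ((hl p).mpr ⟨hx, h⟩)
      · exact Or.inr (Or.inr ⟨(p.1, u), (hl _).mpr ⟨hx, hu⟩, ⟨c1, c2⟩, Prod.ext rfl heq⟩)
  · by_cases hD : c = 'D'
    · subst hD
      rw [if_neg (by decide), if_neg (by decide), if_neg (by decide), if_pos rfl]
      obtain ⟨hg', hiff⟩ := pv_axis_step vy bY (-1) (Or.inr rfl) hgy
      refine ⟨⟨?_, hgx, hg'⟩, hsub⟩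
      intro p
      have hA : (pvRobotStep 'D' (l, t)).1 = PySem.Set.union l
          (List.foldl (fun t (p : Int × Int) =>
            if 0 ≤ p.2 + -1 ∧ p.2 + -1 ≤ 500 then PySem.Set.add t (p.1, -1 + p.2) else t) t l) := rfl
      rw [hA]
      simp only [PySem.Set.mem_union, pv_mem_foldl_add_if]
      constructor
      · rintro (h | h | ⟨q, hq, hc, rfl⟩)
        · have := (hl p).mp h
          exact ⟨this.1, (hiff p.2).mpr (Or.inl this.2)⟩
        · have := (hl p).mp (ht p h)
          exact ⟨this.1, (hiff p.2).mpr (Or.inl this.2)⟩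
        · have hql := (hl q).mp hq
          exact ⟨hql.1, (hiff _).mpr (Or.inr ⟨q.2, hql.2, hc.1, hc.2, rfl⟩)⟩
      · rintro ⟨hx, hy⟩
        rcases (hiff p.2).mp hy with h | ⟨u, hu, c1, c2, heq⟩
        · exact Or.inl ((hl p).mpr ⟨hx, h⟩)
        · exact Or.inr (Or.inr ⟨(p.1, u), (hl _).mpr ⟨hx, hu⟩, ⟨c1, c2⟩, Prod.ext rfl heq⟩)
    · by_cases hL : c = 'L'
      · subst hL
        rw [if_pos rfl, if_neg (by decide), if_neg (by decide)]
        obtain ⟨hg', hiff⟩ := pv_axis_step vx bx 1 (Or.inl rfl) hgx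
        refine ⟨⟨?_, hg', hgy⟩, hsub⟩
        intro p
        have hA : (pvRobotStep 'L' (l, t)).1 = PySem.Set.union l
            (List.foldl (fun t (p : Int × Int) =>
              if 0 ≤ p.1 + 1 ∧ p.1 + 1 ≤ 500 then PySem.Set.add t (1 + p.1, p.2) else t) t l) := rfl
        rw [hA]
        simp only [PySem.Set.mem_union, pv_mem_foldl_add_if]
        constructor
        · rintro (h | h | ⟨q, hq, hc, rfl⟩)
          · have := (hl p).mp h
            exact ⟨(hiff p.1).mpr (Or.inl this.1), this.2⟩
          · have := (hl p).mp (ht p h)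
            exact ⟨(hiff p.1).mpr (Or.inl this.1), this.2⟩
          · have hql := (hl q).mp hq
            exact ⟨(hiff _).mpr (Or.inr ⟨q.1, hql.1, hc.1, hc.2, rfl⟩), hql.2⟩
        · rintro ⟨hx, hy⟩
          rcases (hiff p.1).mp hx with h | ⟨u, hu, c1, c2, heq⟩
          · exact Or.inl ((hl p).mpr ⟨h, hy⟩)
          · exact Or.inr (Or.inr ⟨(u, p.2), (hl _).mpr ⟨hu, hy⟩, ⟨c1, c2⟩, Prod.ext heq rfl⟩)
      · by_cases hR : c = 'R'
        · subst hR
          rw [if_neg (by decide), if_pos rfl, if_neg (by decide), if_neg (by decide)]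
          obtain ⟨hg', hiff⟩ := pv_axis_step vx bx (-1) (Or.inr rfl) hgx
          refine ⟨⟨?_, hg', hgy⟩, hsub⟩
          intro p
          have hA : (pvRobotStep 'R' (l, t)).1 = PySem.Set.union l
              (List.foldl (fun t (p : Int × Int) =>
                if 0 ≤ p.1 + -1 ∧ p.1 + -1 ≤ 500 then PySem.Set.add t (-1 + p.1, p.2) else t) t l) := rfl
          rw [hA]
          simp only [PySem.Set.mem_union, pv_mem_foldl_add_if]
          constructor
          · rintro (h | h | ⟨q, hq, hc, rfl⟩)
            · have := (hl p).mp h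
              exact ⟨(hiff p.1).mpr (Or.inl this.1), this.2⟩
            · have := (hl p).mp (ht p h)
              exact ⟨(hiff p.1).mpr (Or.inl this.1), this.2⟩
            · have hql := (hl q).mp hq
              exact ⟨(hiff _).mpr (Or.inr ⟨q.1, hql.1, hc.1, hc.2, rfl⟩), hql.2⟩
          · rintro ⟨hx, hy⟩
            rcases (hiff p.1).mp hx with h | ⟨u, hu, c1, c2, heq⟩
            · exact Or.inl ((hl p).mpr ⟨h, hy⟩)
            · exact Or.inr (Or.inr ⟨(u, p.2), (hl _).mpr ⟨hu, hy⟩, ⟨c1, c2⟩, Prod.ext heq rfl⟩)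
        · -- c is not a move command: liste gains only old temp elements, blocks unchanged
          rw [if_neg hL, if_neg hR, if_neg hU, if_neg hD]
          have hud : ¬ (c = 'U' ∨ c = 'D') := by simp [hU, hD]
          have hlr : ¬ (c = 'L' ∨ c = 'R') := by simp [hL, hR]
          have hA : (pvRobotStep c (l, t)).1 = PySem.Set.union l t := by
            simp only [pvRobotStep, if_neg hud, if_neg hlr]
          refine ⟨⟨?_, hgx, hgy⟩, hsub⟩
          intro p
          rw [hA]
          simp only [PySem.Set.mem_union]
          constructor
          · rintro (h | h)
            · exact (hl p).mp h
            · exact (hl p).mp (ht p h)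
          · exact fun h => Or.inl ((hl p).mpr h)

lemma pv_fold_inv2 (vx vy : Int) (cs : List Char) :
    ∀ (l t : PySem.Set (Int × Int)) (bx bY : Option (Int × Int)),
      pvInv2 l bx bY vx vy → (∀ p ∈ t, p ∈ l) →
      pvInv2 (cs.foldl (fun lt c => pvRobotStep c lt) (l, t)).1
        (cs.foldl (fun block c => if c = 'L' then pvGrow block vx 1 else if c = 'R' then pvGrow block vx (-1) else block) bx)
        (cs.foldl (fun block c => if c = 'U' then pvGrow block vy 1 else if c = 'D' then pvGrow block vy (-1) else block) bY)
        vx vy := by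
  induction cs with
  | nil => intro l t bx bY h _; simpa using h
  | cons c cs ih =>
    intro l t bx bY h ht
    obtain ⟨h1, h2⟩ := pv_step_inv2 vx vy c l t bx bY h ht
    simpa using ih (pvRobotStep c (l, t)).1 (pvRobotStep c (l, t)).2 _ _ h1 h2

lemma pv_inv_start2 (x y : Int) :
    pvInv2 (PySem.Set.ofList [(x, y)])
      (if 0 ≤ x ∧ x ≤ 500 then some (x, x) else none)
      (if 0 ≤ y ∧ y ≤ 500 then some (y, y) else none) x y := by
  refine ⟨?_, ?_, ?_⟩
  · intro p
    by_cases hx : 0 ≤ x ∧ x ≤ 500 <;> by_cases hy : 0 ≤ y ∧ y ≤ 500 <;>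
      simp [hx, hy, pvAx, pvInB, PySem.Set.mem_ofList, Prod.ext_iff] <;> omega
  · by_cases hx : 0 ≤ x ∧ x ≤ 500 <;> simp [hx, pvGood]
  · by_cases hy : 0 ≤ y ∧ y ≤ 500 <;> simp [hy, pvGood]

-- the final `liste1 & liste2` truthiness
lemma pv_inter_nonempty {α : Type} [BEq α] [LawfulBEq α] (s t : PySem.Set α) :
    (!(PySem.Set.inter s t).isEmpty) = true ↔ ∃ p, p ∈ s ∧ p ∈ t := by
  rw [Bool.not_eq_eq_eq_not, Bool.not_true, List.isEmpty_eq_false_iff_exists_mem]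
  constructor
  · rintro ⟨p, hp⟩; exact ⟨p, (PySem.Set.mem_inter _ _ _).mp hp⟩
  · rintro ⟨p, hp⟩; exact ⟨p, (PySem.Set.mem_inter _ _ _).mpr hp⟩

-- B's per-axis test decides intersection of the two axis sets
lemma pv_meets_iff (v1 v2 : Int) (b1 b2 : Option (Int × Int)) :
    pvMeets v1 b1 v2 b2 = true ↔ ∃ w, pvAx v1 b1 w ∧ pvAx v2 b2 w := by
  constructor
  · intro h
    simp only [pvMeets, Bool.or_eq_true, beq_iff_eq, pvInBlock_iff] at h
    rcases h with ((rfl | h) | h) | h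
    · exact ⟨v1, Or.inl rfl, Or.inl rfl⟩
    · exact ⟨v1, Or.inl rfl, Or.inr h⟩
    · exact ⟨v2, Or.inr h, Or.inl rfl⟩
    · rcases b1 with _ | ⟨l1, h1⟩ <;> rcases b2 with _ | ⟨l2, h2⟩ <;> simp at h
      refine ⟨max l1 l2, Or.inr ?_, Or.inr ?_⟩ <;> simp only [pvInB] <;> omega
  · rintro ⟨w, hw1, hw2⟩
    simp only [pvMeets, Bool.or_eq_true, beq_iff_eq, pvInBlock_iff]
    rcases hw1 with rfl | hb1
    · rcases hw2 with rfl | hb2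
      · exact Or.inl (Or.inl (Or.inl rfl))
      · exact Or.inl (Or.inl (Or.inr hb2))
    · rcases hw2 with rfl | hb2
      · exact Or.inl (Or.inr hb1)
      · rcases b1 with _ | ⟨l1, h1⟩
        · exact hb1.elim
        · rcases b2 with _ | ⟨l2, h2⟩
          · exact hb2.elim
          · refine Or.inr ?_
            simp only [pvInB] at hb1 hb2
            simp only [decide_eq_true_eq]
            omega

-- ===== VERDICT (by name: the statement is the Claim_ definition above) =====
theorem will_robots_collide_spec : Claim_equal_will_robots_collide := by
  intro x1 y1 x2 y2 commands _
  unfold Spec_will_robots_collide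
  have h1 := pv_fold_inv2 x1 y1 commands.toList (PySem.Set.ofList [(x1, y1)]) PySem.Set.empty
    _ _ (pv_inv_start2 x1 y1) (by intro p hp; simp [PySem.Set.empty] at hp)
  have h2 := pv_fold_inv2 x2 y2 commands.toList (PySem.Set.ofList [(x2, y2)]) PySem.Set.empty
    _ _ (pv_inv_start2 x2 y2) (by intro p hp; simp [PySem.Set.empty] at hp)
  obtain ⟨m1, hg1x, hg1y⟩ := h1
  obtain ⟨m2, hg2x, hg2y⟩ := h2
  by_cases heq : x1 = x2 ∧ y1 = y2
  · obtain ⟨rfl, rfl⟩ := heq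
    have halt : will_robots_collide_alt x1 y1 x1 y1 commands = true := by
      unfold will_robots_collide_alt
      simp [pvMeets]
    rw [halt]
    unfold will_robots_collide
    rw [if_pos ⟨rfl, rfl⟩]
  · unfold will_robots_collide will_robots_collide_alt pvAxis
    rw [if_neg heq, Bool.eq_iff_iff, pv_inter_nonempty, Bool.and_eq_true,
      pv_meets_iff, pv_meets_iff]
    constructor
    · rintro ⟨p, hp1, hp2⟩
      have a1 := (m1 p).mp hp1
      have a2 := (m2 p).mp hp2
      exact ⟨⟨p.1, a1.1, a2.1⟩, ⟨p.2, a1.2, a2.2⟩⟩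
    · rintro ⟨⟨a, ha1, ha2⟩, ⟨b, hb1, hb2⟩⟩
      exact ⟨(a, b), (m1 _).mpr ⟨ha1, hb1⟩, (m2 _).mpr ⟨ha2, hb2⟩⟩
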